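-- pv_equiv track=rewrite | github.com/Parcifall-IT/Numberlink-solver | main.py | solve
-- ===== SOURCE A (Python) =====
-- def solve(matrix, numbers, all_paths, current_num, current_paths, used_cells):
--     if current_num > max(numbers.keys()):
--         return current_paths
--
--     if current_num not in all_paths or not all_paths[current_num]:
--         return None
--
--     for path in all_paths[current_num]:
--         if any(cell in used_cells for cell in path):
--             continue
--
--         new_used_cells = used_cells | path
--         new_current_paths = current_paths + [(current_num, path)]
--
--         result = solve(matrix, numbers, all_paths, current_num + 1, new_current_paths, new_used_cells)
--         if result:
--             return result
--
--     return None
-- ===== SOURCE B (Python) =====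
-- def solve(matrix, numbers, all_paths, current_num, current_paths, used_cells):
--     last = max(numbers.keys())
--     # Precompute candidate lists per level; stop after the first empty level,
--     # since the search can never get past a level with no candidate paths.
--     levels = []
--     n = current_num
--     while n <= last:
--         cands = all_paths.get(n, [])
--         levels.append(cands)
--         if not cands:
--             break
--         n += 1
--     return _search(levels, current_num, current_paths, used_cells)
--
--
-- def _search(levels, num, acc, used):
--     if not levels:
--         return acc
--     cands, rest = levels[0], levels[1:]
--     for path in cands:
--         if not any(c in used for c in path):
--             sol = _search(rest, num + 1, acc + [(num, path)], used | path)
--             if sol is not None: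
--                 return sol
--     return None
-- ===== Notes on version B (the rewrite author's own statement) =====
-- stated objective: alternative
-- what changed: A recomputes max(numbers.keys()) and re-queries the dict at every recursive call while recursing on an integer counter; B precomputes the per-level candidate lists once (stopping at the first empty level) and backtracks by structural recursion on that list of levels.
import Mathlib
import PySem

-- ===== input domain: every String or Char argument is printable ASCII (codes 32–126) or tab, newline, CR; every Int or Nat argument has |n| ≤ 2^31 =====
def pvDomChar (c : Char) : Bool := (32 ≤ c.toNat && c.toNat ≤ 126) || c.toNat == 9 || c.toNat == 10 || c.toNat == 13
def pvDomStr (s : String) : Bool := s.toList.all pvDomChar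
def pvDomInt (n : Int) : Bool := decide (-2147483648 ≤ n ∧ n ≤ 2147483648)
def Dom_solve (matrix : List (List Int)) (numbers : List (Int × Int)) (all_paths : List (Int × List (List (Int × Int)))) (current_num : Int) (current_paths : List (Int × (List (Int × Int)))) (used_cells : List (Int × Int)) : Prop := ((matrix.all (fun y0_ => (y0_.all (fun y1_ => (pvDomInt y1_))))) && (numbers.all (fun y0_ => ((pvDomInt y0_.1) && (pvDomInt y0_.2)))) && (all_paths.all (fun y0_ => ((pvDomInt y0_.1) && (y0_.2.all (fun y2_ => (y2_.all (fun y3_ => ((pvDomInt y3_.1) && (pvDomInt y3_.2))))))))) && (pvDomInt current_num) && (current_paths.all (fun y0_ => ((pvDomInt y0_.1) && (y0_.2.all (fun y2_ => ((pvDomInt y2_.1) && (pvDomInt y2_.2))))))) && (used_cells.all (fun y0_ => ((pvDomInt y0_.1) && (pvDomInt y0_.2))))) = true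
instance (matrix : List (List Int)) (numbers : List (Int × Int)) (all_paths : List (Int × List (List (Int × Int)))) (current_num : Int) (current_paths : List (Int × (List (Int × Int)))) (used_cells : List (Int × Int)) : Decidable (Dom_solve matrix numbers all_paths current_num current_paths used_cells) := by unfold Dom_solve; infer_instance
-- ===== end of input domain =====

-- B hoists max(numbers.keys()) and all dict lookups out of the recursion into one precomputed
-- list of candidate levels and recurses on that list (objective: alternative decomposition).


-- ===== PORT A =====
-- A's recursion on current_num is made total with a fuel guard (fuel = number of levels left,
-- always sufficient as passed by `solve`); otherwise it is a step-for-step transliteration.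
mutual
def solveGoA (m : Int) (all_paths : List (Int × List (List (Int × Int)))) (fuel : Nat) (current_num : Int) (current_paths : List (Int × (List (Int × Int)))) (used_cells : List (Int × Int)) : Option (List (Int × (List (Int × Int)))) :=
  if current_num > m then some current_paths
  else match fuel with
    | 0 => none  -- never reached for the fuel `solve` supplies
    | fuel' + 1 =>
      match (PySem.Dict.mk all_paths).get? current_num with
      | none => none          -- current_num not in all_paths
      | some paths =>
        if paths.isEmpty then none   -- not all_paths[current_num]
        else tryPathsA m all_paths fuel' current_num current_paths used_cells paths
termination_by (fuel, 0)
def tryPathsA (m : Int) (all_paths : List (Int × List (List (Int × Int)))) (fuel : Nat) (current_num : Int) (current_paths : List (Int × (List (Int × Int)))) (used_cells : List (Int × Int)) (paths : List (List (Int × Int))) : Option (List (Int × (List (Int × Int)))) :=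
  match paths with
  | [] => none
  | path :: rest =>
    if path.any (fun cell => PySem.Set.contains used_cells cell) then
      tryPathsA m all_paths fuel current_num current_paths used_cells rest
    else
      match solveGoA m all_paths fuel (current_num + 1) (current_paths ++ [(current_num, path)]) (PySem.Set.union used_cells path) with
      | some result =>
        if result.isEmpty then tryPathsA m all_paths fuel current_num current_paths used_cells rest  -- `if result:` — empty list is falsy
        else some result
      | none => tryPathsA m all_paths fuel current_num current_paths used_cells rest
termination_by (fuel, paths.length + 1)
end

def solve (matrix : List (List Int)) (numbers : List (Int × Int)) (all_paths : List (Int × List (List (Int × Int)))) (current_num : Int) (current_paths : List (Int × (List (Int × Int)))) (used_cells : List (Int × Int)) : Option (List (Int × (List (Int × Int)))) :=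
  match PySem.List.max? (numbers.map Prod.fst) (fun x => x) with
  | none => none  -- max(numbers.keys()) raises ValueError; excluded by Pre_solve
  | some m => solveGoA m all_paths (m + 1 - current_num).toNat current_num current_paths used_cells

-- ===== PORT B =====
mutual
def bsearchB (levels : List (List (List (Int × Int)))) (num : Int) (acc : List (Int × (List (Int × Int)))) (used : List (Int × Int)) : Option (List (Int × (List (Int × Int)))) :=
  match levels with
  | [] => some acc
  | cands :: rest => tryCandsB cands rest num acc used
termination_by sizeOf levels
def tryCandsB (cands : List (List (Int × Int))) (rest : List (List (List (Int × Int)))) (num : Int) (acc : List (Int × (List (Int × Int)))) (used : List (Int × Int)) : Option (List (Int × (List (Int × Int)))) :=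
  match cands with
  | [] => none
  | path :: more =>
    if !(path.any (fun cell => PySem.Set.contains used cell)) then
      match bsearchB rest (num + 1) (acc ++ [(num, path)]) (PySem.Set.union used path) with
      | some sol => some sol
      | none => tryCandsB more rest num acc used
    else tryCandsB more rest num acc used
termination_by sizeOf cands + sizeOf rest
end

-- while n <= last: append all_paths.get(n, []); break after an empty level.
-- (fuel = (last + 1 - n).toNat counts the iterations of `n <= last`.)
def buildLevelsB (all_paths : List (Int × List (List (Int × Int)))) (fuel : Nat) (n : Int) : List (List (List (Int × Int))) :=
  match fuel with
  | 0 => []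
  | fuel' + 1 =>
    let cands := ((PySem.Dict.mk all_paths).get? n).getD []
    if cands.isEmpty then [cands] else cands :: buildLevelsB all_paths fuel' (n + 1)

def solve_alt (matrix : List (List Int)) (numbers : List (Int × Int)) (all_paths : List (Int × List (List (Int × Int)))) (current_num : Int) (current_paths : List (Int × (List (Int × Int)))) (used_cells : List (Int × Int)) : Option (List (Int × (List (Int × Int)))) :=
  match PySem.List.max? (numbers.map Prod.fst) (fun x => x) with
  | none => none
  | some last =>
    bsearchB (buildLevelsB all_paths (last + 1 - current_num).toNat current_num)
      current_num current_paths used_cells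

-- ===== PRECONDITION & SPEC =====
-- Pre_solve excludes only numbers = {}: there Python A raises ValueError in max(numbers.keys()).
def Pre_solve (matrix : List (List Int)) (numbers : List (Int × Int)) (all_paths : List (Int × List (List (Int × Int)))) (current_num : Int) (current_paths : List (Int × (List (Int × Int)))) (used_cells : List (Int × Int)) : Prop := numbers ≠ []
instance (matrix : List (List Int)) (numbers : List (Int × Int)) (all_paths : List (Int × List (List (Int × Int)))) (current_num : Int) (current_paths : List (Int × (List (Int × Int)))) (used_cells : List (Int × Int)) : Decidable (Pre_solve matrix numbers all_paths current_num current_paths used_cells) := by unfold Pre_solve; infer_instance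
def pvWitness_solve : List (List Int) × (List (Int × Int)) × (List (Int × List (List (Int × Int)))) × Int × (List (Int × (List (Int × Int)))) × (List (Int × Int)) :=
  ([[1, 1], [0, 0]], [(1, 2)], [(1, [[(0, 0), (0, 1)]])], 1, [], [])
def Spec_solve (matrix : List (List Int)) (numbers : List (Int × Int)) (all_paths : List (Int × List (List (Int × Int)))) (current_num : Int) (current_paths : List (Int × (List (Int × Int)))) (used_cells : List (Int × Int)) (out : Option (List (Int × (List (Int × Int))))) : Prop := out = solve_alt matrix numbers all_paths current_num current_paths used_cells
instance (matrix : List (List Int)) (numbers : List (Int × Int)) (all_paths : List (Int × List (List (Int × Int)))) (current_num : Int) (current_paths : List (Int × (List (Int × Int)))) (used_cells : List (Int × Int)) (out : Option (List (Int × (List (Int × Int))))) : Decidable (Spec_solve matrix numbers all_paths current_num current_paths used_cells out) := by unfold Spec_solve; infer_instance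

-- ===== CLAIM (what is proved, stated in full; the proofs are below) =====
def Claim_equal_solve : Prop := ∀ (matrix : List (List Int)) (numbers : List (Int × Int)) (all_paths : List (Int × List (List (Int × Int)))) (current_num : Int) (current_paths : List (Int × (List (Int × Int)))) (used_cells : List (Int × Int)), Dom_solve matrix numbers all_paths current_num current_paths used_cells → Pre_solve matrix numbers all_paths current_num current_paths used_cells → Spec_solve matrix numbers all_paths current_num current_paths used_cells (solve matrix numbers all_paths current_num current_paths used_cells)

-- ===== LEMMAS AND PROOFS =====

-- Any `some` result of A's search extends the accumulator current_paths.
theorem solveGoA_extends (m : Int) (ap : List (Int × List (List (Int × Int)))) :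
    ∀ fuel cn cp used r, solveGoA m ap fuel cn cp used = some r → ∃ t, r = cp ++ t := by
  intro fuel
  induction fuel with
  | zero =>
    intro cn cp used r h
    unfold solveGoA at h
    split at h
    · exact ⟨[], by simp_all⟩
    · simp at h
  | succ fuel ih =>
    intro cn cp used r h
    have aux : ∀ ps cp used r, tryPathsA m ap fuel cn cp used ps = some r → ∃ t, r = cp ++ t := by
      intro ps
      induction ps with
      | nil => intro cp used r h; unfold tryPathsA at h; simp at h
      | cons path rest ihp =>
        intro cp used r h
        unfold tryPathsA at h
        split at h
        · exact ihp cp used r h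
        · cases hs : solveGoA m ap fuel (cn + 1) (cp ++ [(cn, path)]) (PySem.Set.union used path) with
          | none => rw [hs] at h; exact ihp cp used r h
          | some res =>
            rw [hs] at h
            by_cases he : res.isEmpty
            · simp only [he, if_true] at h; exact ihp cp used r h
            · rw [Bool.not_eq_true] at he
              simp only [he, Bool.false_eq_true, if_false, Option.some.injEq] at h
              obtain ⟨t, ht⟩ := ih (cn + 1) (cp ++ [(cn, path)]) _ res hs
              exact ⟨_, by rw [← h, ht, List.append_assoc]⟩
    unfold solveGoA at h
    split at h
    · exact ⟨[], by simp_all⟩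
    · cases hg : (PySem.Dict.mk ap).get? cn with
      | none => rw [hg] at h; simp at h
      | some paths =>
        rw [hg] at h
        by_cases he : paths.isEmpty
        · simp [he] at h
        · simp only [he] at h
          exact aux paths cp used r h

-- The inner loops agree, given that the search agrees one level deeper.
theorem tryPaths_eq (m : Int) (ap : List (Int × List (List (Int × Int)))) (fuel : Nat) (cn : Int)
    (lvls : List (List (List (Int × Int))))
    (hIH : ∀ cp used, solveGoA m ap fuel (cn + 1) cp used = bsearchB lvls (cn + 1) cp used) :
    ∀ ps cp used, tryPathsA m ap fuel cn cp used ps = tryCandsB ps lvls cn cp used := by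
  intro ps
  induction ps with
  | nil => intro cp used; unfold tryPathsA tryCandsB; rfl
  | cons path rest ihp =>
    intro cp used
    unfold tryPathsA tryCandsB
    by_cases hov : path.any (fun cell => PySem.Set.contains used cell) = true
    · simp only [hov, if_true, Bool.not_true, Bool.false_eq_true, if_false]
      exact ihp cp used
    · simp only [Bool.not_eq_true] at hov
      simp only [hov, Bool.false_eq_true, if_false, Bool.not_false, if_true]
      rw [← hIH]
      cases hs : solveGoA m ap fuel (cn + 1) (cp ++ [(cn, path)]) (PySem.Set.union used path) with
      | none => exact ihp cp used
      | some res =>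
        obtain ⟨t, ht⟩ := solveGoA_extends m ap fuel (cn + 1) _ _ res hs
        have hne : res.isEmpty = false := by
          subst ht; simp
        simp only [hne, Bool.false_eq_true, if_false]

-- Main invariant: with adequate fuel, A's counter recursion equals B's recursion on the level list.
theorem solveGoA_eq_bsearchB (m : Int) (ap : List (Int × List (List (Int × Int)))) :
    ∀ fuel cn, fuel = (m + 1 - cn).toNat →
      ∀ cp used, solveGoA m ap fuel cn cp used =
        bsearchB (buildLevelsB ap fuel cn) cn cp used := by
  intro fuel
  induction fuel with
  | zero =>
    intro cn hf cp used
    have hcn : m < cn := by omega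
    unfold solveGoA buildLevelsB bsearchB
    rw [if_pos hcn]
  | succ fuel ih =>
    intro cn hf cp used
    have hcn : cn ≤ m := by omega
    unfold solveGoA buildLevelsB
    rw [if_neg (by omega)]
    cases hg : (PySem.Dict.mk ap).get? cn with
    | none => simp only [Option.getD_none, List.isEmpty_nil, if_true]; unfold bsearchB tryCandsB; rfl
    | some paths =>
      simp only [Option.getD_some]
      by_cases he : paths.isEmpty
      · rw [List.isEmpty_iff] at he
        subst he
        simp only [List.isEmpty_nil, if_true]
        unfold bsearchB tryCandsB
        rfl
      · rw [if_neg (by simp [he]), if_neg (by simp [he])]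
        unfold bsearchB
        exact tryPaths_eq m ap fuel cn _
          (fun cp used => ih (cn + 1) (by omega) cp used) paths cp used

-- ===== VERDICT (by name: the statement is the Claim_ definition above) =====
theorem solve_spec : Claim_equal_solve := by
  intro matrix numbers ap cn cp used _ _
  unfold Spec_solve solve solve_alt
  cases h : PySem.List.max? (numbers.map Prod.fst) (fun x => x) with
  | none => rfl
  | some m => exact solveGoA_eq_bsearchB m ap _ cn rfl cp used
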